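-- pv_equiv track=rewrite | github.com/pitukg/flashcard-learner | leitner.py | get_session_deck_indices
-- ===== SOURCE A (Python) =====
-- sessions = [(0, 2, 5, 9),
--             (1, 3, 6, 0),
--             (2, 4, 7, 1),
--             (3, 5, 8, 2),
--             (4, 6, 9, 3),
--             (5, 7, 0, 4),
--             (6, 8, 1, 5),
--             (7, 9, 2, 6),
--             (8, 0, 3, 7),
--             (9, 1, 4, 8)]
--
-- def get_session_deck_indices( sessionIndex ):
--
--     indexList = []
--
--     for sessionTuple in sessions:
--         if (sessionTuple[0] == sessionIndex or
--             sessionTuple[1] == sessionIndex or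
--             sessionTuple[2] == sessionIndex or
--             sessionTuple[3] == sessionIndex):
--                 indexList.append(sessions.index(sessionTuple))
--
--     return indexList
-- ===== SOURCE B (Python) =====
-- sessions = [(0, 2, 5, 9),
--             (1, 3, 6, 0),
--             (2, 4, 7, 1),
--             (3, 5, 8, 2),
--             (4, 6, 9, 3),
--             (5, 7, 0, 4),
--             (6, 8, 1, 5),
--             (7, 9, 2, 6),
--             (8, 0, 3, 7),
--             (9, 1, 4, 8)]
--
-- # Inverted index built once: value -> ascending list of row indices.
-- _index_map = {}
-- for _i, _row in enumerate(sessions):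
--     for _v in _row:
--         _index_map.setdefault(_v, []).append(_i)
--
--
-- def get_session_deck_indices(sessionIndex):
--     return list(_index_map.get(sessionIndex, []))
-- ===== Notes on version B (the rewrite author's own statement) =====
-- stated objective: idiomatic
-- what changed: Replaces the per-call full-table scan (with a redundant inner sessions.index scan) by an inverted index dict value->row indices built once at module load, so each call is a single dict lookup returning a fresh copy.
import Mathlib
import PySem

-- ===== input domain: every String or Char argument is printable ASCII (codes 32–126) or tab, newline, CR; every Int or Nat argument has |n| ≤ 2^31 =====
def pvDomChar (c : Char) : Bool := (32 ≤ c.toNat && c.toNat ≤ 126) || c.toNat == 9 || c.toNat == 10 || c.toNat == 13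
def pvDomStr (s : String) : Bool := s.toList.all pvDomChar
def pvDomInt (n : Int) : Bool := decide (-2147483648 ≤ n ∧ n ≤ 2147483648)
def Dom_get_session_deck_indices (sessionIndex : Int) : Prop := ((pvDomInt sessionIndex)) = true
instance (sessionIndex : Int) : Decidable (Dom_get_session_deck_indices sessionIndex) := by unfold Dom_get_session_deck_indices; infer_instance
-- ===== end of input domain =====

-- B replaces A's per-call table scan by an inverted index (value -> row indices) built once; equivalence of the return values is proved below.

def pvSessions : List (Int × Int × Int × Int) :=
  [(0, 2, 5, 9), (1, 3, 6, 0), (2, 4, 7, 1), (3, 5, 8, 2), (4, 6, 9, 3),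
   (5, 7, 0, 4), (6, 8, 1, 5), (7, 9, 2, 6), (8, 0, 3, 7), (9, 1, 4, 8)]

-- ===== PORT A =====
-- sessions.index(sessionTuple) never raises here (the tuple comes from the list), so `.getD 0` is never the default.
def get_session_deck_indices (sessionIndex : Int) : List Int :=
  pvSessions.foldl
    (fun indexList t =>
      if t.1 = sessionIndex ∨ t.2.1 = sessionIndex ∨ t.2.2.1 = sessionIndex ∨ t.2.2.2 = sessionIndex then
        indexList ++ [(((PySem.List.index? pvSessions t).getD 0 : Nat) : Int)]
      else indexList)
    []

-- ===== PORT B =====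
-- the inverted index, built once over enumerate(sessions); setdefault(v, []).append(i) = insert v (getD v [] ++ [i])
def pvIndexMap : PySem.Dict Int (List Int) :=
  (PySem.List.enumerate pvSessions).foldl
    (fun d p =>
      [p.2.1, p.2.2.1, p.2.2.2.1, p.2.2.2.2].foldl
        (fun d v => d.insert v ((d.getD v []) ++ [p.1])) d)
    PySem.Dict.empty

def get_session_deck_indices_alt (sessionIndex : Int) : List Int :=
  pvIndexMap.getD sessionIndex []

-- ===== PRECONDITION & SPEC =====
def Spec_get_session_deck_indices (sessionIndex : Int) (out : List Int) : Prop := out = get_session_deck_indices_alt sessionIndex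
instance (sessionIndex : Int) (out : List Int) : Decidable (Spec_get_session_deck_indices sessionIndex out) := by unfold Spec_get_session_deck_indices; infer_instance

-- ===== CLAIM (what is proved, stated in full; the proofs are below) =====
def Claim_equal_get_session_deck_indices : Prop := ∀ (sessionIndex : Int), Dom_get_session_deck_indices sessionIndex → Spec_get_session_deck_indices sessionIndex (get_session_deck_indices sessionIndex)

-- ===== LEMMAS AND PROOFS =====

-- the inverted index evaluates to this literal dict
set_option maxRecDepth 8192 in
lemma pvIndexMap_eq : pvIndexMap = PySem.Dict.mk
    [(0, [0, 1, 5, 8]), (2, [0, 2, 3, 7]), (5, [0, 3, 5, 6]), (9, [0, 4, 7, 9]),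
     (1, [1, 2, 6, 9]), (3, [1, 3, 4, 8]), (6, [1, 4, 6, 7]), (4, [2, 4, 5, 9]),
     (7, [2, 5, 7, 8]), (8, [3, 6, 8, 9])] := by decide

lemma both_nil_of_ne (s : Int)
    (h0 : s ≠ 0) (h1 : s ≠ 1) (h2 : s ≠ 2) (h3 : s ≠ 3) (h4 : s ≠ 4)
    (h5 : s ≠ 5) (h6 : s ≠ 6) (h7 : s ≠ 7) (h8 : s ≠ 8) (h9 : s ≠ 9) :
    get_session_deck_indices s = get_session_deck_indices_alt s := by
  have hA : get_session_deck_indices s = [] := by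
    simp only [get_session_deck_indices, pvSessions, List.foldl]
    rw [if_neg (by omega), if_neg (by omega), if_neg (by omega), if_neg (by omega),
        if_neg (by omega), if_neg (by omega), if_neg (by omega), if_neg (by omega),
        if_neg (by omega), if_neg (by omega)]
  have hB : get_session_deck_indices_alt s = [] := by
    simp only [get_session_deck_indices_alt, pvIndexMap_eq, PySem.Dict.getD,
      PySem.Dict.get?_mk_cons]
    simp only [beq_iff_eq]
    rw [if_neg (by omega), if_neg (by omega), if_neg (by omega), if_neg (by omega),
        if_neg (by omega), if_neg (by omega), if_neg (by omega), if_neg (by omega),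
        if_neg (by omega), if_neg (by omega)]
    rfl
  rw [hA, hB]

-- ===== VERDICT (by name: the statement is the Claim_ definition above) =====
set_option maxRecDepth 8192 in
theorem get_session_deck_indices_spec : Claim_equal_get_session_deck_indices := by
  intro s _
  unfold Spec_get_session_deck_indices
  by_cases h0 : s = 0; · subst h0; decide
  by_cases h1 : s = 1; · subst h1; decide
  by_cases h2 : s = 2; · subst h2; decide
  by_cases h3 : s = 3; · subst h3; decide
  by_cases h4 : s = 4; · subst h4; decide
  by_cases h5 : s = 5; · subst h5; decide
  by_cases h6 : s = 6; · subst h6; decide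
  by_cases h7 : s = 7; · subst h7; decide
  by_cases h8 : s = 8; · subst h8; decide
  by_cases h9 : s = 9; · subst h9; decide
  exact both_nil_of_ne s h0 h1 h2 h3 h4 h5 h6 h7 h8 h9
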